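-- pv_equiv track=rewrite | github.com/arady94/AoC-2025 | Day8/Part1/main2.py | find_n_largest_circuits
-- ===== SOURCE A (Python) =====
-- from collections import defaultdict, deque
--
-- def find_n_largest_circuits(connections, n):
--     """
--     Find the n largest circuits (connected components) after making connections.
--     This uses Union-Find to efficiently track which junction boxes are connected.
--     """
--     # Union-Find data structure
--     parent = {}
--     size = {}
--
--     # Get all nodes
--     all_nodes = set()
--     for a, b in connections:
--         all_nodes.add(a)
--         all_nodes.add(b)
--
--     # Initialize: each node is its own parent
--     for node in all_nodes:
--         parent[node] = node
--         size[node] = 1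
--
--     def find(x):
--         """Find root of x with path compression"""
--         if parent[x] != x:
--             parent[x] = find(parent[x])
--         return parent[x]
--
--     def union(x, y):
--         """Union two sets"""
--         root_x = find(x)
--         root_y = find(y)
--
--         if root_x == root_y:
--             return  # Already in same circuit
--
--         # Union by size: attach smaller tree to larger
--         if size[root_x] < size[root_y]:
--             parent[root_x] = root_y
--             size[root_y] += size[root_x]
--         else:
--             parent[root_y] = root_x
--             size[root_x] += size[root_y]
--
--     # Process all connections
--     for a, b in connections:
--         union(a, b)
--
--     # Find all circuit sizes
--     circuit_sizes = defaultdict(int)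
--     for node in all_nodes:
--         root = find(node)
--         circuit_sizes[root] += 1
--
--     # Get the n largest circuits
--     sizes = sorted(circuit_sizes.values(), reverse=True)
--     return sizes[:n]
-- ===== SOURCE B (Python) =====
-- def find_n_largest_circuits(connections, n):
--     """
--     Find the n largest circuits (connected components) after making connections.
--     Uses direct label propagation: every node carries the label of its circuit;
--     joining two circuits relabels one of them.
--     """
--     label = {}
--     for a, b in connections:
--         la = label.setdefault(a, a)
--         lb = label.setdefault(b, b)
--         if la != lb:
--             for x, lx in label.items():
--                 if lx == lb:
--                     label[x] = la
--     counts = {}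
--     for lx in label.values():
--         counts[lx] = counts.get(lx, 0) + 1
--     sizes = sorted(counts.values(), reverse=True)
--     return sizes[:n]
-- ===== Notes on version B (the rewrite author's own statement) =====
-- stated objective: simpler
-- what changed: Replaces the union-find forest (recursive find with path compression, union by size, then a re-counting pass over a parent forest) by direct label propagation: each node carries its component's label in one dict, joining two components simply relabels one of them, and component sizes are read off by counting labels.
import Mathlib
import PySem

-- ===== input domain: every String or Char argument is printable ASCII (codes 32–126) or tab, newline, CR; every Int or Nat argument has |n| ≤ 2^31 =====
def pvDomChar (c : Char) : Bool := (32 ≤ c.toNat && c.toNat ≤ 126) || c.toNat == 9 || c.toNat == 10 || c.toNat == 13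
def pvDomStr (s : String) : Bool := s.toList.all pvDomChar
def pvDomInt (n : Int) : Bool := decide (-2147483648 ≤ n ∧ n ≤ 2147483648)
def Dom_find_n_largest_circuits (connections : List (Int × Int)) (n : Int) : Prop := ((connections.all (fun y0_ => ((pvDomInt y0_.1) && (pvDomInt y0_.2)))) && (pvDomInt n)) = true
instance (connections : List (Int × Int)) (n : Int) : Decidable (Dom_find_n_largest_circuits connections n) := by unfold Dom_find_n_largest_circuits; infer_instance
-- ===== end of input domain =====

-- B replaces A's union-find (recursive find with path compression, union by size, recount pass)
-- by direct label propagation over a single dict; objective: simpler (not faster).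

-- ===== PORT A =====
-- recursive `find` with path compression; fuel-guarded (fuel = number of keys + 1, always
-- sufficient because parent chains visit distinct keys — proved below), returns (root, parent)
def pvFindA : Nat → PySem.Dict Int Int → Int → Int × PySem.Dict Int Int
  | 0, parent, x => (x, parent)
  | fuel+1, parent, x =>
    let px := parent.getD x x
    if px ≠ x then
      let res := pvFindA fuel parent px
      (res.1, res.2.insert x res.1)
    else (x, parent)

def pvFind (parent : PySem.Dict Int Int) (x : Int) : Int × PySem.Dict Int Int :=
  pvFindA (parent.items.length + 1) parent x

-- `union` on the state (parent, size)
def pvUnionA (st : PySem.Dict Int Int × PySem.Dict Int Int) (a b : Int) :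
    PySem.Dict Int Int × PySem.Dict Int Int :=
  let fa := pvFind st.1 a
  let fb := pvFind fa.2 b
  let rootx := fa.1
  let rooty := fb.1
  let parent := fb.2
  let size := st.2
  if rootx = rooty then (parent, size)
  else if size.getD rootx 0 < size.getD rooty 0 then
    (parent.insert rootx rooty, size.insert rooty (size.getD rooty 0 + size.getD rootx 0))
  else
    (parent.insert rooty rootx, size.insert rootx (size.getD rootx 0 + size.getD rooty 0))

def find_n_largest_circuits (connections : List (Int × Int)) (n : Int) : List Int :=
  let all_nodes : PySem.Set Int :=
    connections.foldl (fun s c => PySem.Set.add (PySem.Set.add s c.1) c.2) PySem.Set.empty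
  let init : PySem.Dict Int Int × PySem.Dict Int Int :=
    all_nodes.foldl (fun pr node => (pr.1.insert node node, pr.2.insert node 1))
      (PySem.Dict.empty, PySem.Dict.empty)
  let st := connections.foldl (fun st c => pvUnionA st c.1 c.2) init
  let fin := all_nodes.foldl
    (fun pr node =>
      let f := pvFind pr.2 node
      (pr.1.insert f.1 (pr.1.getD f.1 0 + 1), f.2))
    ((PySem.Dict.empty : PySem.Dict Int Int), st.1)
  let sizes := PySem.List.sorted fin.1.values (fun v => v) true
  PySem.List.slice sizes none (some n)

-- ===== PORT B =====
-- 'for x, lx in label.items(): if lx == lb: label[x] = la' (values rewritten in place)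
def pvRelabelB (lab : PySem.Dict Int Int) (la lb : Int) : PySem.Dict Int Int :=
  PySem.Dict.mk (lab.items.map (fun p => if p.2 = lb then (p.1, la) else p))

def pvStepB (lab : PySem.Dict Int Int) (a b : Int) : PySem.Dict Int Int :=
  let la := lab.getD a a
  let lab1 := lab.setdefault a a
  let lb := lab1.getD b b
  let lab2 := lab1.setdefault b b
  if la ≠ lb then pvRelabelB lab2 la lb else lab2

def find_n_largest_circuits_alt (connections : List (Int × Int)) (n : Int) : List Int :=
  let label := connections.foldl (fun lab c => pvStepB lab c.1 c.2) PySem.Dict.empty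
  let counts := label.values.foldl (fun c lx => c.insert lx (c.getD lx 0 + 1)) PySem.Dict.empty
  let sizes := PySem.List.sorted counts.values (fun v => v) true
  PySem.List.slice sizes none (some n)

-- ===== PRECONDITION & SPEC =====
def Spec_find_n_largest_circuits (connections : List (Int × Int)) (n : Int) (out : List Int) : Prop := out = find_n_largest_circuits_alt connections n
instance (connections : List (Int × Int)) (n : Int) (out : List Int) : Decidable (Spec_find_n_largest_circuits connections n out) := by unfold Spec_find_n_largest_circuits; infer_instance

-- ===== CLAIM (what is proved, stated in full; the proofs are below) =====
def Claim_equal_find_n_largest_circuits : Prop := ∀ (connections : List (Int × Int)) (n : Int), Dom_find_n_largest_circuits connections n → Spec_find_n_largest_circuits connections n (find_n_largest_circuits connections n)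

-- ===== LEMMAS AND PROOFS =====

-- The parent chain from x to its root r, listing the visited nodes.
inductive pvChain (p : PySem.Dict Int Int) : Int → Int → List Int → Prop
  | base (x : Int) (h : p.getD x x = x) : pvChain p x x [x]
  | step (x y r : Int) (l : List Int) (hx : p.getD x x = y) (hne : y ≠ x)
      (hc : pvChain p y r l) : pvChain p x r (x :: l)

def pvRoot (p : PySem.Dict Int Int) (x r : Int) : Prop := ∃ l, pvChain p x r l

-- the union-find forest invariant over the fixed node list `nodes`
def pvForest (nodes : List Int) (p : PySem.Dict Int Int) : Prop :=
  p.keys = nodes ∧ ∀ x ∈ nodes, ∃ r l, pvChain p x r l ∧ l.Nodup ∧ l ⊆ nodes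

def pvRootEq (p : PySem.Dict Int Int) (x y : Int) : Prop :=
  ∃ r, pvRoot p x r ∧ pvRoot p y r

def pvLabD (lab : PySem.Dict Int Int) (x : Int) : Int := lab.getD x x

-- joint invariant between A's parent forest and B's label dict
def pvInv (nodes : List Int) (p lab : PySem.Dict Int Int) : Prop :=
  pvForest nodes p ∧
  (∀ x v, lab.get? x = some v → v ∈ lab.keys) ∧
  lab.keys ⊆ nodes ∧
  (∀ x ∈ nodes, pvLabD lab (pvLabD lab x) = pvLabD lab x ∧ pvLabD lab x ∈ nodes) ∧
  (∀ x ∈ nodes, ∀ y ∈ nodes, (pvRootEq p x y ↔ pvLabD lab x = pvLabD lab y))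

-- root-finding without compression (used only in proofs, to name A's roots)
def pvRootD : Nat → PySem.Dict Int Int → Int → Int
  | 0, _, x => x
  | fuel+1, p, x => let px := p.getD x x; if px = x then x else pvRootD fuel p px

def pvRootOf (p : PySem.Dict Int Int) (x : Int) : Int :=
  pvRootD (p.items.length + 1) p x

-- ---- basic chain facts ----
theorem pvChain_unique {p : PySem.Dict Int Int} {x r r' : Int} {l l' : List Int}
    (h : pvChain p x r l) (h' : pvChain p x r' l') : r = r' ∧ l = l' := by
  induction h generalizing r' l' with
  | base x hx =>
    cases h' with
    | base _ _ => exact ⟨rfl, rfl⟩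
    | step _ y _ _ hx' hne _ => exact absurd (hx.symm.trans hx').symm hne
  | step x y r l hx hne hc ih =>
    cases h' with
    | base _ hx' => exact absurd (hx.symm.trans hx') hne
    | step _ y' _ l₂ hx' hne' hc' =>
      have hy : y' = y := hx'.symm.trans hx
      subst hy
      obtain ⟨h1, h2⟩ := ih hc'
      exact ⟨h1, by rw [h2]⟩

theorem pvChain_root_fix {p : PySem.Dict Int Int} {x r : Int} {l : List Int}
    (h : pvChain p x r l) : p.getD r r = r := by
  induction h with
  | base _ hx => exact hx
  | step _ _ _ _ _ _ _ ih => exact ih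

theorem pvChain_root_mem {p : PySem.Dict Int Int} {x r : Int} {l : List Int}
    (h : pvChain p x r l) : r ∈ l := by
  induction h with
  | base _ _ => simp
  | step _ _ _ _ _ _ _ ih => simp [ih]

theorem pvChain_mem_root {p : PySem.Dict Int Int} {x r : Int} {l : List Int}
    (h : pvChain p x r l) : ∀ z ∈ l, ∃ l', pvChain p z r l' ∧ l'.Sublist l := by
  induction h with
  | base x hx =>
    intro z hz; simp at hz; subst hz
    exact ⟨[z], .base z hx, List.Sublist.refl _⟩
  | step x y r l hx hne hc ih =>
    intro z hz
    rcases List.mem_cons.1 hz with hz | hz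
    · subst hz; exact ⟨z :: l, .step z y r l hx hne hc, List.Sublist.refl _⟩
    · obtain ⟨l', h1, h2⟩ := ih z hz
      exact ⟨l', h1, h2.trans (List.sublist_cons_self _ _)⟩

theorem pvRoot_of_fix {p : PySem.Dict Int Int} {r : Int} (h : p.getD r r = r) :
    pvRoot p r r := ⟨[r], .base r h⟩

theorem pvRoot_unique {p : PySem.Dict Int Int} {x r r' : Int}
    (h : pvRoot p x r) (h' : pvRoot p x r') : r = r' := by
  obtain ⟨l, hl⟩ := h; obtain ⟨l', hl'⟩ := h'
  exact (pvChain_unique hl hl').1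

theorem pvRoot_fix_eq {p : PySem.Dict Int Int} {r r' : Int}
    (hfix : p.getD r r = r) (h : pvRoot p r r') : r' = r :=
  pvRoot_unique h (pvRoot_of_fix hfix)

theorem pvRoot_root {p : PySem.Dict Int Int} {x r : Int} (h : pvRoot p x r) :
    pvRoot p r r := by
  obtain ⟨l, hl⟩ := h
  exact pvRoot_of_fix (pvChain_root_fix hl)

-- a node not among the keys is its own (isolated) root
theorem pvRoot_not_mem_keys {p : PySem.Dict Int Int} {x : Int} (h : x ∉ p.keys) :
    pvRoot p x x := by
  refine pvRoot_of_fix ?_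
  have hc : p.contains x = false := by
    by_contra hc
    exact h ((PySem.Dict.contains_iff_mem_keys p x).1 (by revert hc; cases hpx : p.contains x <;> simp))
  exact PySem.Dict.getD_of_not_contains p x hc

theorem pvForest_total {nodes : List Int} {p : PySem.Dict Int Int}
    (hF : pvForest nodes p) (x : Int) : ∃ r, pvRoot p x r := by
  by_cases hx : x ∈ nodes
  · obtain ⟨r, l, h1, _, _⟩ := hF.2 x hx
    exact ⟨r, l, h1⟩
  · exact ⟨x, pvRoot_not_mem_keys (by rw [hF.1]; exact hx)⟩

-- getD at key x with default x differs from x only when x is a key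
theorem pvGetD_ne_mem_keys {p : PySem.Dict Int Int} {x : Int}
    (h : p.getD x x ≠ x) : x ∈ p.keys := by
  by_contra hx
  have hc : p.contains x = false := by
    by_contra hc
    exact hx ((PySem.Dict.contains_iff_mem_keys p x).1 (by revert hc; cases hpx : p.contains x <;> simp))
  exact h (PySem.Dict.getD_of_not_contains p x hc)

-- ---- find with path compression ----
theorem pvFindA_spec {p : PySem.Dict Int Int} {x r : Int} {l : List Int}
    (hc : pvChain p x r l) : ∀ fuel, l.length ≤ fuel →
    (pvFindA fuel p x).1 = r ∧
    (pvFindA fuel p x).2.keys = p.keys ∧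
    (∀ z, ((pvFindA fuel p x).2.getD z z = p.getD z z) ∨
          ((pvFindA fuel p x).2.getD z z = r ∧ pvRoot p z r)) := by
  induction hc with
  | base x hx =>
    intro fuel hf
    match fuel, hf with
    | fuel+1, _ =>
      simp [pvFindA, hx]
  | step x y r l hx hne hc ih =>
    intro fuel hf
    match fuel, hf with
    | fuel+1, hf =>
      have hf' : l.length ≤ fuel := by simpa using hf
      obtain ⟨ih1, ih2, ih3⟩ := ih fuel hf'
      have hxk : x ∈ (pvFindA fuel p y).2.keys := by
        rw [ih2]; exact pvGetD_ne_mem_keys (by rw [hx]; exact hne)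
      have hcont : (pvFindA fuel p y).2.contains x = true :=
        (PySem.Dict.contains_iff_mem_keys _ _).2 hxk
      constructor
      · simp [pvFindA, hx, hne, ih1]
      constructor
      · simp only [pvFindA, hx]
        rw [if_pos hne]
        rw [PySem.Dict.keys_insert_of_contains _ _ hcont]; exact ih2
      · intro z
        simp only [pvFindA, hx]
        rw [if_pos hne]
        simp only [ih1]
        by_cases hz : z = x
        · subst hz
          right
          constructor
          · simp

          · exact ⟨z :: l, .step z y r l hx hne hc⟩
        · rw [PySem.Dict.getD_insert]
          rw [if_neg hz]
          rcases ih3 z with h | ⟨h1, h2⟩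
          · exact Or.inl h
          · exact Or.inr ⟨h1, h2⟩

-- repointing some nodes directly at their root preserves every chain (shrinking it)
theorem pvChain_repoint {p p' : PySem.Dict Int Int}
    (h : ∀ z, p'.getD z z = p.getD z z ∨ (∃ r₀, p'.getD z z = r₀ ∧ pvRoot p z r₀)) :
    ∀ {x r : Int} {l : List Int}, pvChain p x r l → l.Nodup →
      ∃ l', pvChain p' x r l' ∧ l'.Nodup ∧ l' ⊆ l := by
  intro x r l hc
  induction hc with
  | base x hx =>
    intro _
    have hfix : p'.getD x x = x := by
      rcases h x with h' | ⟨r₀, h1, h2⟩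
      · rw [h', hx]
      · rw [h1, pvRoot_fix_eq hx h2]
    exact ⟨[x], .base x hfix, by simp, by simp⟩
  | step x y r l hx hne hc ih =>
    intro hnd
    have hroot : pvRoot p x r := ⟨x :: l, .step x y r l hx hne hc⟩
    have hrfix : p.getD r r = r := pvChain_root_fix (.step x y r l hx hne hc)
    have hrfix' : p'.getD r r = r := by
      rcases h r with h' | ⟨r₀, h1, h2⟩
      · rw [h', hrfix]
      · rw [h1, pvRoot_fix_eq hrfix h2]
    rcases h x with h' | ⟨r₀, h1, h2⟩
    · -- parent of x unchanged: recurse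
      obtain ⟨l', c', nd', sub'⟩ := ih (List.Nodup.of_cons hnd)
      have hxl : x ∉ l' := fun hx' => (List.nodup_cons.1 hnd).1 (sub' hx')
      exact ⟨x :: l', .step x y r l' (by rw [h', hx]) hne c',
        List.nodup_cons.2 ⟨hxl, nd'⟩, by
          intro z hz
          rcases List.mem_cons.1 hz with hz | hz
          · simp [hz]
          · exact List.mem_cons_of_mem _ (sub' hz)⟩
    · -- x now points directly at its root
      have hr₀ : r₀ = r := pvRoot_unique h2 hroot
      subst hr₀
      by_cases hxr : x = r₀
      · subst hxr
        exact ⟨[x], .base x (by rw [h1]), by simp, by simp⟩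
      · refine ⟨[x, r₀], .step x r₀ r₀ [r₀] h1 (Ne.symm hxr) (.base r₀ hrfix'),
          by simp [hxr], ?_⟩
        intro z hz
        simp only [List.mem_cons] at hz
        rcases hz with hz | hz | hz
        · simp [hz]
        · subst hz
          exact pvChain_root_mem (pvChain.step x y _ l hx hne hc)
        · simp at hz

-- every chain is duplicate-free (parent lookup is deterministic)
theorem pvChain_nodup {p : PySem.Dict Int Int} {x r : Int} {l : List Int}
    (h : pvChain p x r l) : l.Nodup := by
  induction h with
  | base x hx => simp
  | step x y r l hx hne hc ih =>
    refine List.nodup_cons.2 ⟨?_, ih⟩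
    intro hmem
    obtain ⟨l', hc', hsub⟩ := pvChain_mem_root hc x hmem
    have := pvChain_unique hc' (pvChain.step x y r l hx hne hc)
    have hlen : l'.length ≤ l.length := hsub.length_le
    have : l'.length = l.length + 1 := by rw [this.2]; simp
    omega

theorem pvRoot_repoint {p p' : PySem.Dict Int Int}
    (h : ∀ z, p'.getD z z = p.getD z z ∨ (∃ r₀, p'.getD z z = r₀ ∧ pvRoot p z r₀))
    {y r : Int} (hr : pvRoot p y r) : pvRoot p' y r := by
  obtain ⟨l, hl⟩ := hr
  obtain ⟨l', hc', _, _⟩ := pvChain_repoint h hl (pvChain_nodup hl)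
  exact ⟨l', hc'⟩

-- find: full specification under the forest invariant
theorem pvFind_spec {nodes : List Int} {p : PySem.Dict Int Int}
    (hF : pvForest nodes p) {x : Int} (hx : x ∈ nodes) :
    pvRoot p x (pvFind p x).1 ∧ pvForest nodes (pvFind p x).2 ∧
    (∀ y r, pvRoot p y r ↔ pvRoot (pvFind p x).2 y r) := by
  obtain ⟨hkeys, hforest⟩ := hF
  obtain ⟨r, l, hc, hnd, hsub⟩ := hforest x hx
  have hkl : p.keys.length = p.items.length := by
    simp only [PySem.Dict.keys, List.length_map]
  have hlen : l.length ≤ p.items.length + 1 := by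
    have hc1 : l.toFinset.card = l.length := List.toFinset_card_of_nodup hnd
    have hc2 : l.toFinset ⊆ nodes.toFinset := by
      intro w hw
      exact List.mem_toFinset.2 (hsub (List.mem_toFinset.1 hw))
    have hc3 : l.toFinset.card ≤ nodes.toFinset.card := Finset.card_le_card hc2
    have hc4 : nodes.toFinset.card ≤ nodes.length := nodes.toFinset_card_le
    have hnl : nodes.length = p.items.length := by rw [← hkeys]; exact hkl
    omega
  obtain ⟨h1, h2, h3⟩ := pvFindA_spec hc (p.items.length + 1) hlen
  have hrp : ∀ z, (pvFind p x).2.getD z z = p.getD z z ∨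
      (∃ r₀, (pvFind p x).2.getD z z = r₀ ∧ pvRoot p z r₀) := by
    intro z
    rcases h3 z with h | ⟨ha, hb⟩
    · exact Or.inl h
    · exact Or.inr ⟨r, ha, hb⟩
  have hiff : ∀ y r', pvRoot p y r' ↔ pvRoot (pvFind p x).2 y r' := by
    intro y r'
    constructor
    · exact pvRoot_repoint hrp
    · intro hy
      obtain ⟨r'', hr''⟩ := pvForest_total ⟨hkeys, hforest⟩ y
      have := pvRoot_repoint hrp hr''
      rwa [pvRoot_unique hy this]
  refine ⟨?_, ⟨h2.trans hkeys, ?_⟩, hiff⟩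
  · show pvRoot p x (pvFindA (p.items.length + 1) p x).1
    rw [h1]; exact ⟨l, hc⟩
  · intro z hz
    obtain ⟨rz, lz, hcz, hndz, hsubz⟩ := hforest z hz
    obtain ⟨l', hc', hnd', hsub'⟩ := pvChain_repoint hrp hcz hndz
    exact ⟨rz, l', hc', hnd', fun w hw => hsubz (hsub' hw)⟩

-- chains avoiding the re-linked root transfer verbatim
theorem pvChain_insert_of_not_mem {p : PySem.Dict Int Int} {y r r2 v : Int} {l : List Int}
    (hc : pvChain p y r l) (hnm : r2 ∉ l) : pvChain (p.insert r2 v) y r l := by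
  induction hc with
  | base x hx =>
    refine pvChain.base x ?_
    rw [PySem.Dict.getD_insert, if_neg (Ne.symm (by simpa using hnm)), hx]
  | step x y r l hx hne hc ih =>
    simp only [List.mem_cons, not_or] at hnm
    exact pvChain.step x y r l
      (by rw [PySem.Dict.getD_insert, if_neg (Ne.symm hnm.1), hx]) hne (ih hnm.2)

-- every member of a chain has the chain's root
theorem pvRoot_of_mem_chain {p : PySem.Dict Int Int} {y r z : Int} {l : List Int}
    (hc : pvChain p y r l) (hz : z ∈ l) : pvRoot p z r := by
  obtain ⟨l', h', _⟩ := pvChain_mem_root hc z hz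
  exact ⟨l', h'⟩

-- extending a chain ending at r2 through the new link r2 → r1
theorem pvChain_link_extend {p : PySem.Dict Int Int} {y r1 r2 : Int} {l : List Int}
    (hc : pvChain p y r2 l) (h1 : p.getD r1 r1 = r1) (h12 : r1 ≠ r2) :
    pvChain (p.insert r2 r1) y r1 (l ++ [r1]) := by
  have main : ∀ (y rr : Int) (l : List Int), pvChain p y rr l → rr = r2 →
      pvChain (p.insert r2 r1) y r1 (l ++ [r1]) := by
    intro y rr l hc
    induction hc with
    | base x hx =>
      intro he; subst he
      exact pvChain.step x r1 r1 [r1]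
        (PySem.Dict.getD_insert_self p x r1 x) h12
        (pvChain.base r1 (by rw [PySem.Dict.getD_insert, if_neg h12, h1]))
    | step x y r l hx hne hc ih =>
      intro he
      have hrfix : p.getD r r = r := pvChain_root_fix hc
      have hxr : x ≠ r := by
        intro hxe
        rw [hxe, hrfix] at hx
        exact hne (hx.symm.trans hxe.symm)
      have hxne : x ≠ r2 := fun hxe => hxr (hxe.trans he.symm)
      exact pvChain.step x y r1 (l ++ [r1])
        (by rw [PySem.Dict.getD_insert, if_neg hxne, hx]) hne (ih he)
  exact main y r2 l hc rfl

-- linking root r2 under root r1 (r1 ≠ r2): the forest survives and roots are renamed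
theorem pvLink_spec {nodes : List Int} {p : PySem.Dict Int Int}
    (hF : pvForest nodes p) {r1 r2 : Int}
    (h1 : p.getD r1 r1 = r1) (h2 : p.getD r2 r2 = r2) (h12 : r1 ≠ r2)
    (hm1 : r1 ∈ nodes) (hm2 : r2 ∈ nodes) :
    pvForest nodes (p.insert r2 r1) ∧
    (∀ y r, pvRoot p y r → pvRoot (p.insert r2 r1) y (if r = r2 then r1 else r)) := by
  have hmap : ∀ y r, pvRoot p y r → pvRoot (p.insert r2 r1) y (if r = r2 then r1 else r) := by
    intro y r hy
    obtain ⟨l, hl⟩ := hy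
    by_cases hr : r = r2
    · subst hr
      rw [if_pos rfl]
      exact ⟨l ++ [r1], pvChain_link_extend hl h1 h12⟩
    · rw [if_neg hr]
      refine ⟨l, pvChain_insert_of_not_mem hl ?_⟩
      intro hmem
      have := pvRoot_of_mem_chain hl hmem
      exact hr (pvRoot_unique this (pvRoot_of_fix h2)) 
  refine ⟨⟨?_, ?_⟩, hmap⟩
  · have : p.contains r2 = true := by
      refine (PySem.Dict.contains_iff_mem_keys p r2).2 ?_
      rw [hF.1]; exact hm2
    rw [PySem.Dict.keys_insert_of_contains _ _ this]
    exact hF.1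
  · intro z hz
    obtain ⟨rz, lz, hcz, hndz, hsubz⟩ := hF.2 z hz
    by_cases hr : rz = r2
    · subst hr
      refine ⟨r1, lz ++ [r1], pvChain_link_extend hcz h1 h12,
        pvChain_nodup (pvChain_link_extend hcz h1 h12), ?_⟩
      intro w hw
      rcases List.mem_append.1 hw with h | h
      · exact hsubz h
      · simp at h; subst h; exact hm1
    · refine ⟨rz, lz, pvChain_insert_of_not_mem hcz ?_, hndz, hsubz⟩
      intro hmem
      exact hr (pvRoot_unique (pvRoot_of_mem_chain hcz hmem) (pvRoot_of_fix h2))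

-- ---- root-equivalence basics ----
theorem pvRootEq_symm {p : PySem.Dict Int Int} {x y : Int}
    (h : pvRootEq p x y) : pvRootEq p y x := by
  obtain ⟨r, h1, h2⟩ := h; exact ⟨r, h2, h1⟩

theorem pvRootEq_trans {p : PySem.Dict Int Int} {x y z : Int}
    (h1 : pvRootEq p x y) (h2 : pvRootEq p y z) : pvRootEq p x z := by
  obtain ⟨r, hx, hy⟩ := h1
  obtain ⟨r', hy', hz⟩ := h2
  rw [pvRoot_unique hy hy'] at hx
  exact ⟨r', hx, hz⟩

theorem pvRoot_self_fix {p : PySem.Dict Int Int} {r : Int} (h : pvRoot p r r) :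
    p.getD r r = r := by
  obtain ⟨l, hl⟩ := h; exact pvChain_root_fix hl

theorem pvRoot_mem_nodes {nodes : List Int} {p : PySem.Dict Int Int}
    (hF : pvForest nodes p) {x r : Int} (hx : x ∈ nodes) (h : pvRoot p x r) :
    r ∈ nodes := by
  obtain ⟨r', l, hc, _, hsub⟩ := hF.2 x hx
  rw [pvRoot_unique h ⟨l, hc⟩]
  exact hsub (pvChain_root_mem hc)

theorem pvRootEq_iff_eq_of_fix {p : PySem.Dict Int Int} {x rx s : Int}
    (hx : pvRoot p x rx) (hs : p.getD s s = s) : pvRootEq p x s ↔ rx = s := by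
  constructor
  · rintro ⟨r, h1, h2⟩
    rw [pvRoot_unique hx h1]
    exact pvRoot_unique h2 (pvRoot_of_fix hs)
  · rintro rfl
    exact ⟨rx, hx, pvRoot_of_fix hs⟩

theorem pvRootEq_iff_eq {p : PySem.Dict Int Int} {x y rx ry : Int}
    (hx : pvRoot p x rx) (hy : pvRoot p y ry) : pvRootEq p x y ↔ rx = ry := by
  constructor
  · rintro ⟨r, h1, h2⟩
    rw [pvRoot_unique hx h1, pvRoot_unique hy h2]
  · intro h
    exact ⟨ry, h ▸ hx, hy⟩

theorem pvRootEq_congr_right {p : PySem.Dict Int Int} {x a a' : Int}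
    (h : pvRootEq p a a') : pvRootEq p x a ↔ pvRootEq p x a' :=
  ⟨fun h' => pvRootEq_trans h' h, fun h' => pvRootEq_trans h' (pvRootEq_symm h)⟩

theorem pvRootEq_of_iff {p q : PySem.Dict Int Int}
    (h : ∀ y r, pvRoot p y r ↔ pvRoot q y r) (x y : Int) :
    pvRootEq p x y ↔ pvRootEq q x y := by
  unfold pvRootEq
  exact exists_congr (fun r => and_congr (h x r) (h y r))

-- the equality pattern produced by collapsing exactly the pair {A, B}
theorem pvMergePattern (u v A B : Int) :
    (u = v ∨ (u = A ∧ v = B) ∨ (u = B ∧ v = A)) ↔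
      ((if u = B then A else u) = (if v = B then A else v)) := by
  by_cases h1 : u = B <;> by_cases h2 : v = B <;> simp [h1, h2] <;> omega

-- linking r2 under r1 merges exactly the classes of r1 and r2
theorem pvLink_rootEq {nodes : List Int} {p : PySem.Dict Int Int}
    (hF : pvForest nodes p) {r1 r2 : Int}
    (h1 : p.getD r1 r1 = r1) (h2 : p.getD r2 r2 = r2) (h12 : r1 ≠ r2)
    (hm1 : r1 ∈ nodes) (hm2 : r2 ∈ nodes) :
    pvForest nodes (p.insert r2 r1) ∧
    (∀ x y, pvRootEq (p.insert r2 r1) x y ↔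
      (pvRootEq p x y ∨ (pvRootEq p x r1 ∧ pvRootEq p y r2) ∨
        (pvRootEq p x r2 ∧ pvRootEq p y r1))) := by
  obtain ⟨hF', hmap⟩ := pvLink_spec hF h1 h2 h12 hm1 hm2
  refine ⟨hF', ?_⟩
  intro x y
  obtain ⟨rx, hrx⟩ := pvForest_total hF x
  obtain ⟨ry, hry⟩ := pvForest_total hF y
  have hx' := hmap x rx hrx
  have hy' := hmap y ry hry
  rw [pvRootEq_iff_eq hx' hy', pvRootEq_iff_eq hrx hry,
    pvRootEq_iff_eq_of_fix hrx h1, pvRootEq_iff_eq_of_fix hry h2,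
    pvRootEq_iff_eq_of_fix hrx h2, pvRootEq_iff_eq_of_fix hry h1]
  exact (pvMergePattern rx ry r1 r2).symm

-- one union call: the forest survives and exactly the classes of a and b merge
set_option maxHeartbeats 1000000 in
theorem pvUnionA_spec {nodes : List Int} {p size : PySem.Dict Int Int} {a b : Int}
    (hF : pvForest nodes p) (ha : a ∈ nodes) (hb : b ∈ nodes) :
    pvForest nodes (pvUnionA (p, size) a b).1 ∧
    (∀ x y, pvRootEq (pvUnionA (p, size) a b).1 x y ↔
      (pvRootEq p x y ∨ (pvRootEq p x a ∧ pvRootEq p y b) ∨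
        (pvRootEq p x b ∧ pvRootEq p y a))) := by
  obtain ⟨hra, hF1, hiff1⟩ := pvFind_spec hF ha
  obtain ⟨hrb1, hF2, hiff2⟩ := pvFind_spec hF1 hb
  have hrb : pvRoot p b (pvFind (pvFind p a).2 b).1 :=
    (hiff1 b _).2 hrb1
  have hiff : ∀ y r, pvRoot p y r ↔ pvRoot (pvFind (pvFind p a).2 b).2 y r :=
    fun y r => (hiff1 y r).trans (hiff2 y r)
  set ra := (pvFind p a).1 with hraDef
  set rb := (pvFind (pvFind p a).2 b).1 with hrbDef
  set p2 := (pvFind (pvFind p a).2 b).2 with hp2Def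
  have hEab : pvRootEq p a b ↔ ra = rb := pvRootEq_iff_eq hra hrb
  -- roots of a and b inside p2
  have hra2 : pvRoot p2 a ra := (hiff a ra).1 hra
  have hrb2 : pvRoot p2 b rb := (hiff b rb).1 hrb
  have hfix_a : p2.getD ra ra = ra := pvRoot_self_fix (pvRoot_root hra2)
  have hfix_b : p2.getD rb rb = rb := pvRoot_self_fix (pvRoot_root hrb2)
  have hmem_a : ra ∈ nodes := pvRoot_mem_nodes hF ha hra
  have hmem_b : rb ∈ nodes := pvRoot_mem_nodes hF hb hrb
  have hEq2 : ∀ x y, pvRootEq p x y ↔ pvRootEq p2 x y := pvRootEq_of_iff hiff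
  have hEa : pvRootEq p a ra := ⟨ra, hra, pvRoot_root hra⟩
  have hEb : pvRootEq p b rb := ⟨rb, hrb, pvRoot_root hrb⟩
  show pvForest nodes (pvUnionA (p, size) a b).1 ∧ _
  have hun : pvUnionA (p, size) a b =
      if ra = rb then (p2, size)
      else if size.getD ra 0 < size.getD rb 0 then
        (p2.insert ra rb, size.insert rb (size.getD rb 0 + size.getD ra 0))
      else
        (p2.insert rb ra, size.insert ra (size.getD ra 0 + size.getD rb 0)) := by
    rfl
  by_cases hrr : ra = rb
  · rw [hun, if_pos hrr]
    refine ⟨hF2, ?_⟩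
    intro x y
    rw [← hEq2 x y]
    constructor
    · exact Or.inl
    · rintro (h | ⟨h1, h2⟩ | ⟨h1, h2⟩)
      · exact h
      · exact pvRootEq_trans h1 (pvRootEq_trans (hEab.2 hrr) (pvRootEq_symm h2))
      · exact pvRootEq_trans h1 (pvRootEq_trans (pvRootEq_symm (hEab.2 hrr)) (pvRootEq_symm h2))
  · rw [hun, if_neg hrr]
    by_cases hsz : size.getD ra 0 < size.getD rb 0
    · rw [if_pos hsz]
      obtain ⟨hF3, hiff3⟩ := pvLink_rootEq hF2 hfix_b hfix_a
        (fun h => hrr h.symm) hmem_b hmem_a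
      refine ⟨hF3, ?_⟩
      intro x y
      rw [show ((p2.insert ra rb, size.insert rb (size.getD rb 0 + size.getD ra 0)).1) = p2.insert ra rb from rfl]
      rw [hiff3 x y, ← hEq2 x y,
        ← hEq2 x rb, ← hEq2 y ra, ← hEq2 x ra, ← hEq2 y rb]
      have e1 : pvRootEq p x ra ↔ pvRootEq p x a := pvRootEq_congr_right (pvRootEq_symm hEa)
      have e2 : pvRootEq p y rb ↔ pvRootEq p y b := pvRootEq_congr_right (pvRootEq_symm hEb)
      have e3 : pvRootEq p x rb ↔ pvRootEq p x b := pvRootEq_congr_right (pvRootEq_symm hEb)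
      have e4 : pvRootEq p y ra ↔ pvRootEq p y a := pvRootEq_congr_right (pvRootEq_symm hEa)
      rw [e1, e2, e3, e4]
      exact or_congr_right or_comm
    · rw [if_neg hsz]
      obtain ⟨hF3, hiff3⟩ := pvLink_rootEq hF2 hfix_a hfix_b hrr hmem_a hmem_b
      refine ⟨hF3, ?_⟩
      intro x y
      rw [show ((p2.insert rb ra, size.insert ra (size.getD ra 0 + size.getD rb 0)).1) = p2.insert rb ra from rfl]
      rw [hiff3 x y, ← hEq2 x y,
        ← hEq2 x ra, ← hEq2 y rb, ← hEq2 x rb, ← hEq2 y ra]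
      have e1 : pvRootEq p x ra ↔ pvRootEq p x a := pvRootEq_congr_right (pvRootEq_symm hEa)
      have e2 : pvRootEq p y rb ↔ pvRootEq p y b := pvRootEq_congr_right (pvRootEq_symm hEb)
      have e3 : pvRootEq p x rb ↔ pvRootEq p x b := pvRootEq_congr_right (pvRootEq_symm hEb)
      have e4 : pvRootEq p y ra ↔ pvRootEq p y a := pvRootEq_congr_right (pvRootEq_symm hEa)
      rw [e1, e2, e3, e4]

-- ---- B-side dict lemmas ----
theorem pvGet?_mapval (g : Int → Int) :
    ∀ (items : List (Int × Int)) (x : Int),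
      (PySem.Dict.mk (items.map (fun q => (q.1, g q.2)))).get? x
        = ((PySem.Dict.mk items).get? x).map g := by
  intro items
  induction items with
  | nil => intro x; rfl
  | cons q rest ih =>
    intro x
    obtain ⟨k, v⟩ := q
    simp only [List.map_cons, PySem.Dict.get?_mk_cons]
    by_cases h : k = x
    · simp [h]
    · simp only [show (k == x) = false by simpa using h, Bool.false_eq_true, if_false]
      exact ih x

theorem pvRelabelB_eq (lab : PySem.Dict Int Int) (la lb : Int) :
    pvRelabelB lab la lb
      = PySem.Dict.mk (lab.items.map (fun q => (q.1, if q.2 = lb then la else q.2))) := by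
  unfold pvRelabelB
  congr 1
  apply List.map_congr_left
  intro q _
  by_cases h : q.2 = lb <;> simp [h]

theorem pvRelabelB_get? (lab : PySem.Dict Int Int) (la lb x : Int) :
    (pvRelabelB lab la lb).get? x
      = (lab.get? x).map (fun v => if v = lb then la else v) := by
  obtain ⟨items⟩ := lab
  rw [pvRelabelB_eq]
  exact pvGet?_mapval (fun v => if v = lb then la else v) items x

theorem pvRelabelB_keys (lab : PySem.Dict Int Int) (la lb : Int) :
    (pvRelabelB lab la lb).keys = lab.keys := by
  rw [pvRelabelB_eq]
  simp only [PySem.Dict.keys, List.map_map]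
  rfl

theorem pvLabD_setdefault (lab : PySem.Dict Int Int) (a x : Int) :
    pvLabD (lab.setdefault a a) x = pvLabD lab x := by
  unfold pvLabD
  by_cases h : x = a
  · subst h
    exact PySem.Dict.getD_setdefault_self lab x x x
  · rw [PySem.Dict.getD_eq_get?_getD, PySem.Dict.get?_setdefault_of_ne lab a h,
      ← PySem.Dict.getD_eq_get?_getD]

theorem pvKeys_setdefault (lab : PySem.Dict Int Int) (a v : Int) :
    (lab.setdefault a v).keys = PySem.Set.add lab.keys a := by
  by_cases h : lab.contains a = true
  · rw [PySem.Dict.setdefault_of_contains lab v h,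
      PySem.Set.add_of_mem ((PySem.Dict.contains_iff_mem_keys lab a).1 h)]
  · have h' : lab.contains a = false := by revert h; cases lab.contains a <;> simp
    rw [PySem.Dict.setdefault_of_not_contains lab v h',
      PySem.Dict.keys_insert_of_not_contains lab v h',
      PySem.Set.add_of_not_mem
        (fun hm => by rw [(PySem.Dict.contains_iff_mem_keys lab a).2 hm] at h'; cases h')]

theorem pvGet?_of_mem_keys {d : PySem.Dict Int Int} {x : Int} (h : x ∈ d.keys) :
    d.get? x = some (pvLabD d x) := by
  unfold pvLabD
  cases hg : d.get? x with
  | none => exact absurd h ((PySem.Dict.get?_eq_none_iff_not_mem_keys d x).1 hg)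
  | some v => rw [PySem.Dict.getD_of_get?_eq_some d x hg]

theorem pvLabD_not_mem_keys {d : PySem.Dict Int Int} {x : Int} (h : x ∉ d.keys) :
    pvLabD d x = x := by
  unfold pvLabD
  cases hg : d.get? x with
  | none => exact PySem.Dict.getD_of_get?_eq_none d x hg
  | some v =>
    exact absurd (PySem.Dict.mem_keys_of_mem_items d (PySem.Dict.mem_items_of_get?_eq_some d hg)) h

theorem pvLabD_of_get?_some {d : PySem.Dict Int Int} {x v : Int} (h : d.get? x = some v) :
    pvLabD d x = v := PySem.Dict.getD_of_get?_eq_some d x h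

theorem pvLabD_of_get?_none {d : PySem.Dict Int Int} {x : Int} (h : d.get? x = none) :
    pvLabD d x = x := PySem.Dict.getD_of_get?_eq_none d x h

theorem pvV_setdefault (lab : PySem.Dict Int Int) (a : Int)
    (hV : ∀ x v, lab.get? x = some v → v ∈ lab.keys) :
    ∀ x v, (lab.setdefault a a).get? x = some v → v ∈ (lab.setdefault a a).keys := by
  intro x v h
  rw [pvKeys_setdefault]
  by_cases hx : x = a
  · subst hx
    rw [PySem.Dict.get?_setdefault_self lab x x] at h
    cases hg : lab.get? x with
    | none => rw [hg] at h; simp at h; exact (PySem.Set.mem_add _ _ _).2 (Or.inr h.symm)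
    | some w =>
      rw [hg] at h; simp at h
      exact (PySem.Set.mem_add _ _ _).2 (Or.inl (h ▸ hV x w hg))
  · rw [PySem.Dict.get?_setdefault_of_ne lab a hx] at h
    exact (PySem.Set.mem_add _ _ _).2 (Or.inl (hV x v h))

theorem pvV_relabel (lab2 : PySem.Dict Int Int) (la lb : Int)
    (hV : ∀ x v, lab2.get? x = some v → v ∈ lab2.keys) (hla : la ∈ lab2.keys) :
    ∀ x v, (pvRelabelB lab2 la lb).get? x = some v → v ∈ (pvRelabelB lab2 la lb).keys := by
  intro x v h
  rw [pvRelabelB_keys]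
  rw [pvRelabelB_get?] at h
  cases hg : lab2.get? x with
  | none => rw [hg] at h; simp at h
  | some w =>
    rw [hg] at h; simp at h
    by_cases hw : w = lb
    · rw [if_pos hw] at h; exact h ▸ hla
    · rw [if_neg hw] at h; exact h ▸ hV x w hg

-- the keys added by one B step
theorem pvStepB_keys (lab : PySem.Dict Int Int) (a b : Int) :
    (pvStepB lab a b).keys = PySem.Set.add (PySem.Set.add lab.keys a) b := by
  unfold pvStepB
  by_cases h : lab.getD a a ≠ (lab.setdefault a a).getD b b
  · rw [if_pos h, pvRelabelB_keys, pvKeys_setdefault, pvKeys_setdefault]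
  · rw [if_neg h, pvKeys_setdefault, pvKeys_setdefault]

-- one B step rewrites the label function by collapsing {label a, label b}
theorem pvStepB_labD (lab : PySem.Dict Int Int) (a b : Int)
    (hV : ∀ x v, lab.get? x = some v → v ∈ lab.keys) (x : Int) :
    pvLabD (pvStepB lab a b) x =
      (if pvLabD lab x = pvLabD lab b then pvLabD lab a else pvLabD lab x) := by
  have hV1 := pvV_setdefault lab a hV
  have hV2 := pvV_setdefault (lab.setdefault a a) b hV1
  have hlab1 : ∀ z, pvLabD (lab.setdefault a a) z = pvLabD lab z :=
    fun z => pvLabD_setdefault lab a z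
  have hlab2 : ∀ z, pvLabD ((lab.setdefault a a).setdefault b b) z = pvLabD lab z :=
    fun z => (pvLabD_setdefault (lab.setdefault a a) b z).trans (hlab1 z)
  unfold pvStepB
  simp only []
  have hla : lab.getD a a = pvLabD lab a := rfl
  have hlb : (lab.setdefault a a).getD b b = pvLabD lab b := hlab1 b
  by_cases hm : lab.getD a a ≠ (lab.setdefault a a).getD b b
  · rw [if_pos hm]
    set lab2 := (lab.setdefault a a).setdefault b b with hlab2def
    have hkeys2 : lab2.keys = PySem.Set.add (PySem.Set.add lab.keys a) b := by
      rw [hlab2def, pvKeys_setdefault, pvKeys_setdefault]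
    by_cases hx : x ∈ lab2.keys
    · have hg2 : lab2.get? x = some (pvLabD lab2 x) := pvGet?_of_mem_keys hx
      have hgr : (pvRelabelB lab2 (lab.getD a a) ((lab.setdefault a a).getD b b)).get? x
          = some (if pvLabD lab2 x = (lab.setdefault a a).getD b b then lab.getD a a
                  else pvLabD lab2 x) := by
        rw [pvRelabelB_get?, hg2]; rfl
      rw [pvLabD_of_get?_some hgr, hlab2 x, hla, hlb]
    · -- x is no key: its label is x on both sides, and x ≠ label b (labels are keys)
      have hxl : pvLabD lab2 x = x := pvLabD_not_mem_keys hx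
      have hxlab : pvLabD lab x = x := by rw [← hlab2 x]; exact hxl
      have hbk : b ∈ lab2.keys := by
        rw [hkeys2]; exact (PySem.Set.mem_add _ _ _).2 (Or.inr rfl)
      have hlbk : pvLabD lab b ∈ lab2.keys := by
        have := pvGet?_of_mem_keys hbk
        rw [hlab2 b] at this
        exact hV2 b (pvLabD lab b) this
      have hxne : x ≠ pvLabD lab b := fun he => hx (he ▸ hlbk)
      have hgr : (pvRelabelB lab2 (lab.getD a a) ((lab.setdefault a a).getD b b)).get? x = none := by
        rw [pvRelabelB_get?, (PySem.Dict.get?_eq_none_iff_not_mem_keys lab2 x).2 hx]; rfl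
      rw [pvLabD_of_get?_none hgr, if_neg (fun he => hxne (hxlab.symm.trans he))]
      exact hxlab.symm
  · rw [if_neg hm]
    rw [not_not] at hm
    rw [hla, hlb] at hm
    rw [hlab2 x]
    split
    · next hcond => exact hcond.trans hm.symm
    · rfl

-- V is preserved by one B step
theorem pvStepB_V (lab : PySem.Dict Int Int) (a b : Int)
    (hV : ∀ x v, lab.get? x = some v → v ∈ lab.keys) :
    ∀ x v, (pvStepB lab a b).get? x = some v → v ∈ (pvStepB lab a b).keys := by
  have hV1 := pvV_setdefault lab a hV
  have hV2 := pvV_setdefault (lab.setdefault a a) b hV1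
  unfold pvStepB
  simp only []
  by_cases hm : lab.getD a a ≠ (lab.setdefault a a).getD b b
  · rw [if_pos hm]
    apply pvV_relabel _ _ _ hV2
    -- la = label a is a key of lab2
    have hak : a ∈ ((lab.setdefault a a).setdefault b b).keys := by
      rw [pvKeys_setdefault, pvKeys_setdefault]
      exact (PySem.Set.mem_add _ _ _).2 (Or.inl ((PySem.Set.mem_add _ _ _).2 (Or.inr rfl)))
    have hga := pvGet?_of_mem_keys hak
    have : pvLabD ((lab.setdefault a a).setdefault b b) a = lab.getD a a := by
      rw [(pvLabD_setdefault (lab.setdefault a a) b a), (pvLabD_setdefault lab a a)]; rfl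
    rw [this] at hga
    exact hV2 a (lab.getD a a) hga
  · rw [if_neg hm]
    exact hV2

-- ---- the joint invariant is preserved by one edge ----
theorem pvStep_inv {nodes : List Int} {p size lab : PySem.Dict Int Int} {a b : Int}
    (ha : a ∈ nodes) (hb : b ∈ nodes) (hI : pvInv nodes p lab) :
    pvInv nodes (pvUnionA (p, size) a b).1 (pvStepB lab a b) := by
  obtain ⟨hF, hV, hKsub, hIdem, hE⟩ := hI
  obtain ⟨hF', hEq'⟩ := pvUnionA_spec hF ha hb (size := size)
  have hlabD := pvStepB_labD lab a b hV
  have hV' := pvStepB_V lab a b hV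
  have hKsub' : (pvStepB lab a b).keys ⊆ nodes := by
    rw [pvStepB_keys]
    intro z hz
    rcases (PySem.Set.mem_add _ _ _).1 hz with hz | hz
    · rcases (PySem.Set.mem_add _ _ _).1 hz with hz | hz
      · exact hKsub hz
      · exact hz ▸ ha
    · exact hz ▸ hb
  refine ⟨hF', hV', hKsub', ?_, ?_⟩
  · -- idempotence and membership of the new labelling
    intro x hx
    rw [hlabD x]
    by_cases hc : pvLabD lab x = pvLabD lab b
    · rw [if_pos hc, hlabD (pvLabD lab a), (hIdem a ha).1]
      refine ⟨?_, (hIdem a ha).2⟩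
      by_cases hab : pvLabD lab a = pvLabD lab b
      · rw [if_pos hab]
      · rw [if_neg hab]
    · rw [if_neg hc, hlabD (pvLabD lab x), (hIdem x hx).1, if_neg hc]
      exact ⟨rfl, (hIdem x hx).2⟩
  · -- the class correspondence
    intro x hx y hy
    rw [hEq' x y, hlabD x, hlabD y,
      ← pvMergePattern (pvLabD lab x) (pvLabD lab y) (pvLabD lab a) (pvLabD lab b)]
    rw [← hE x hx y hy, ← hE x hx a ha, ← hE y hy b hb, ← hE x hx b hb, ← hE y hy a ha]

-- the invariant (plus the key-list bookkeeping) along the edge fold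
theorem pvFold_inv {nodes : List Int} :
    ∀ (cs : List (Int × Int)) (p size lab : PySem.Dict Int Int),
      (∀ c ∈ cs, c.1 ∈ nodes ∧ c.2 ∈ nodes) → pvInv nodes p lab →
      pvInv nodes (cs.foldl (fun st c => pvUnionA st c.1 c.2) (p, size)).1
          (cs.foldl (fun l c => pvStepB l c.1 c.2) lab) ∧
      (cs.foldl (fun l c => pvStepB l c.1 c.2) lab).keys
        = cs.foldl (fun s c => PySem.Set.add (PySem.Set.add s c.1) c.2) lab.keys := by
  intro cs
  induction cs with
  | nil => intro p size lab hcs hI; exact ⟨hI, rfl⟩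
  | cons c rest ih =>
    intro p size lab hcs hI
    have hI' := pvStep_inv (size := size) (hcs c (by simp)).1 (hcs c (by simp)).2 hI
    have hrec := ih (pvUnionA (p, size) c.1 c.2).1 (pvUnionA (p, size) c.1 c.2).2
      (pvStepB lab c.1 c.2) (fun d hd => hcs d (by simp [hd])) hI'
    simp only [List.foldl_cons]
    exact ⟨hrec.1, by rw [hrec.2, pvStepB_keys]⟩

-- ---- the initial state ----
theorem pvInit_inv {nodes : List Int} (hnd : nodes.Nodup) :
    pvInv nodes
      (nodes.foldl (fun d x => d.insert x x) PySem.Dict.empty)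
      PySem.Dict.empty := by
  have hitems : (nodes.foldl (fun d x => d.insert x x) PySem.Dict.empty).items
      = nodes.map (fun x => (x, x)) := by
    have := PySem.Dict.items_foldl_insert_fresh nodes (fun a => a) (fun a => a)
      PySem.Dict.empty (fun a _ => PySem.Dict.contains_empty a)
      (by simpa using hnd)
    simpa using this
  have hkeys : (nodes.foldl (fun d x => d.insert x x) PySem.Dict.empty).keys = nodes := by
    simp [PySem.Dict.keys, hitems, Function.comp_def]
  have hget : ∀ x ∈ nodes,
      (nodes.foldl (fun d x => d.insert x x) PySem.Dict.empty).getD x x = x := by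
    intro x hx
    have hmem : (x, x) ∈ (nodes.foldl (fun d x => d.insert x x) PySem.Dict.empty).items := by
      rw [hitems]; exact List.mem_map.2 ⟨x, hx, rfl⟩
    exact PySem.Dict.getD_of_mem_items _ hmem (by rw [hkeys]; exact hnd) _
  refine ⟨⟨hkeys, ?_⟩, ?_, ?_, ?_, ?_⟩
  · intro x hx
    exact ⟨x, [x], pvChain.base x (hget x hx), by simp, by simpa using hx⟩
  · intro x v h
    rw [PySem.Dict.get?_empty] at h
    cases h
  · rw [PySem.Dict.keys_empty]
    exact List.nil_subset nodes
  · intro x hx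
    unfold pvLabD
    rw [PySem.Dict.getD_empty, PySem.Dict.getD_empty]
    exact ⟨rfl, hx⟩
  · intro x hx y hy
    unfold pvLabD
    rw [PySem.Dict.getD_empty, PySem.Dict.getD_empty]
    constructor
    · rintro ⟨r, h1, h2⟩
      rw [← pvRoot_fix_eq (hget x hx) h1, ← pvRoot_fix_eq (hget y hy) h2]
    · rintro rfl
      exact ⟨x, pvRoot_of_fix (hget x hx), pvRoot_of_fix (hget x hx)⟩

-- ---- membership and nodup of the collected node list ----
theorem pvNodes_mono (cs : List (Int × Int)) :
    ∀ (s : List Int) (x : Int), x ∈ s →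
      x ∈ cs.foldl (fun s c => PySem.Set.add (PySem.Set.add s c.1) c.2) s := by
  induction cs with
  | nil => intro s x hx; exact hx
  | cons c rest ih =>
    intro s x hx
    exact ih _ x ((PySem.Set.mem_add _ _ _).2 (Or.inl ((PySem.Set.mem_add _ _ _).2 (Or.inl hx))))

theorem pvNodes_mem (cs : List (Int × Int)) :
    ∀ (s : List Int) (c : Int × Int), c ∈ cs →
      c.1 ∈ cs.foldl (fun s c => PySem.Set.add (PySem.Set.add s c.1) c.2) s ∧
      c.2 ∈ cs.foldl (fun s c => PySem.Set.add (PySem.Set.add s c.1) c.2) s := by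
  induction cs with
  | nil => intro s c hc; cases hc
  | cons d rest ih =>
    intro s c hc
    rcases List.mem_cons.1 hc with hc | hc
    · subst hc
      constructor
      · exact pvNodes_mono rest _ c.1
          ((PySem.Set.mem_add _ _ _).2 (Or.inl ((PySem.Set.mem_add _ _ _).2 (Or.inr rfl))))
      · exact pvNodes_mono rest _ c.2 ((PySem.Set.mem_add _ _ _).2 (Or.inr rfl))
    · exact ih _ c hc

theorem pvNodes_nodup (cs : List (Int × Int)) :
    ∀ (s : List Int), s.Nodup →
      (cs.foldl (fun s c => PySem.Set.add (PySem.Set.add s c.1) c.2) s).Nodup := by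
  induction cs with
  | nil => intro s hs; exact hs
  | cons c rest ih =>
    intro s hs
    exact ih _ (PySem.Set.nodup_add _ _ (PySem.Set.nodup_add _ _ hs))

-- ---- the counting stage of A ----
theorem pvRootD_eq {p : PySem.Dict Int Int} {x r : Int} {l : List Int}
    (hc : pvChain p x r l) : ∀ fuel, l.length ≤ fuel → pvRootD fuel p x = r := by
  induction hc with
  | base x hx =>
    intro fuel hf
    match fuel, hf with
    | fuel+1, _ => simp [pvRootD, hx]
  | step x y r l hx hne hc ih =>
    intro fuel hf
    match fuel, hf with
    | fuel+1, hf =>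
      simp only [pvRootD]
      rw [hx, if_neg hne]
      exact ih fuel (by simpa using hf)

theorem pvRootOf_spec {nodes : List Int} {p : PySem.Dict Int Int}
    (hF : pvForest nodes p) (x : Int) : pvRoot p x (pvRootOf p x) := by
  by_cases hx : x ∈ nodes
  · obtain ⟨r, l, hc, hndl, hsub⟩ := hF.2 x hx
    have hkl : p.keys.length = p.items.length := by
      simp only [PySem.Dict.keys, List.length_map]
    have hc1 : l.toFinset.card = l.length := List.toFinset_card_of_nodup hndl
    have hc2 : l.toFinset ⊆ nodes.toFinset :=
      fun w hw => List.mem_toFinset.2 (hsub (List.mem_toFinset.1 hw))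
    have hc3 := Finset.card_le_card hc2
    have hc4 := nodes.toFinset_card_le
    have hnl : nodes.length = p.items.length := by rw [← hF.1]; exact hkl
    rw [pvRootOf, pvRootD_eq hc (p.items.length + 1) (by omega)]
    exact ⟨l, hc⟩
  · have hroot : pvRoot p x x := pvRoot_not_mem_keys (by rw [hF.1]; exact hx)
    rw [pvRootOf, pvRootD_eq (pvChain.base x (pvRoot_self_fix hroot)) (p.items.length + 1)
      (by simp)]
    exact hroot

theorem pvRootOf_eq {nodes : List Int} {p : PySem.Dict Int Int}
    (hF : pvForest nodes p) {x r : Int} (h : pvRoot p x r) : pvRootOf p x = r :=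
  pvRoot_unique (pvRootOf_spec hF x) h

theorem pvCount_fold {nodes : List Int} {pStar : PySem.Dict Int Int}
    (hFs : pvForest nodes pStar) :
    ∀ (ns : List Int) (p c : PySem.Dict Int Int),
      pvForest nodes p → (∀ y r, pvRoot p y r ↔ pvRoot pStar y r) →
      (∀ x ∈ ns, x ∈ nodes) →
      (ns.foldl
        (fun pr node =>
          let f := pvFind pr.2 node
          (pr.1.insert f.1 (pr.1.getD f.1 0 + 1), f.2))
        (c, p)).1
      = ns.foldl (fun d x => d.insert (pvRootOf pStar x) (d.getD (pvRootOf pStar x) 0 + 1)) c := by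
  intro ns
  induction ns with
  | nil => intro p c _ _ _; rfl
  | cons x rest ih =>
    intro p c hF hiff hmem
    obtain ⟨hrx, hF', hiff'⟩ := pvFind_spec hF (hmem x (by simp))
    have hrooteq : (pvFind p x).1 = pvRootOf pStar x :=
      (pvRootOf_eq hFs ((hiff x (pvFind p x).1).1 hrx)).symm
    simp only [List.foldl_cons]
    rw [ih (pvFind p x).2 (c.insert (pvFind p x).1 (c.getD (pvFind p x).1 0 + 1)) hF'
      (fun y r => ((hiff' y r).symm.trans (hiff y r)))
      (fun z hz => hmem z (by simp [hz])), hrooteq]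

-- ---- counter values are invariant under an injective relabelling of the keys ----
theorem pvOfList_map_inj (φ : Int → Int) :
    ∀ (t : List Int), (∀ u ∈ t, ∀ v ∈ t, φ u = φ v → u = v) →
      PySem.Set.ofList (t.map φ) = (PySem.Set.ofList t).map φ := by
  intro t
  induction t using List.reverseRecOn with
  | nil => intro _; rfl
  | append_singleton t u ih =>
    intro hinj
    have hinj' : ∀ a ∈ t, ∀ b ∈ t, φ a = φ b → a = b :=
      fun a ha b hb => hinj a (by simp [ha]) b (by simp [hb])
    rw [List.map_append, List.map_singleton, PySem.Set.ofList_append_singleton,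
      PySem.Set.ofList_append_singleton, ih hinj',
      PySem.Set.add_eq_ite, PySem.Set.add_eq_ite]
    by_cases hu : u ∈ PySem.Set.ofList t
    · rw [if_pos hu, if_pos (List.mem_map.2 ⟨u, hu, rfl⟩)]
    · have hnm : φ u ∉ (PySem.Set.ofList t).map φ := by
        intro hmem
        obtain ⟨w, hw, hweq⟩ := List.mem_map.1 hmem
        have hw' : w ∈ t := (PySem.Set.mem_ofList t w).1 hw
        have : w = u := hinj w (by simp [hw']) u (by simp) hweq
        exact hu (this ▸ hw)
      rw [if_neg hu, if_neg hnm, List.map_append, List.map_singleton]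

theorem pvCount_map_inj (φ : Int → Int) (t : List Int)
    (hinj : ∀ u ∈ t, ∀ v ∈ t, φ u = φ v → u = v) {k : Int} (hk : k ∈ t) :
    (t.map φ).count (φ k) = t.count k := by
  rw [List.count_eq_countP, List.count_eq_countP, List.countP_map]
  apply List.countP_congr
  intro x hx
  simp only [Function.comp]
  constructor
  · intro h
    have := hinj x hx k hk (by simpa using h)
    simp [this]
  · intro h
    have hx' : x = k := by simpa using h
    simp [hx']

theorem pvCounterValues_map (φ : Int → Int) (t : List Int)
    (hinj : ∀ u ∈ t, ∀ v ∈ t, φ u = φ v → u = v) :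
    (PySem.Dict.counter (t.map φ)).values = (PySem.Dict.counter t).values := by
  show (PySem.Dict.counter (t.map φ)).items.map (·.2) = (PySem.Dict.counter t).items.map (·.2)
  rw [PySem.Dict.items_counter, PySem.Dict.items_counter, pvOfList_map_inj φ t hinj,
    List.map_map, List.map_map, List.map_map]
  apply List.map_congr_left
  intro k hk
  have hk' : k ∈ t := (PySem.Set.mem_ofList t k).1 hk
  simp only [Function.comp]
  rw [pvCount_map_inj φ t hinj hk']

-- ---- named pieces of the two programs ----
def pvNodesOf (cs : List (Int × Int)) : List Int :=
  cs.foldl (fun s c => PySem.Set.add (PySem.Set.add s c.1) c.2) PySem.Set.empty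

def pvParentStar (cs : List (Int × Int)) : PySem.Dict Int Int :=
  (cs.foldl (fun st c => pvUnionA st c.1 c.2)
    ((pvNodesOf cs).foldl (fun pr node => (pr.1.insert node node, pr.2.insert node 1))
      ((PySem.Dict.empty : PySem.Dict Int Int), (PySem.Dict.empty : PySem.Dict Int Int)))).1

def pvLabStar (cs : List (Int × Int)) : PySem.Dict Int Int :=
  cs.foldl (fun lab c => pvStepB lab c.1 c.2) PySem.Dict.empty

-- ---- the assembly ----
-- ===== VERDICT (by name: the statement is the Claim_ definition above) =====
theorem find_n_largest_circuits_spec : Claim_equal_find_n_largest_circuits := by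
  unfold Claim_equal_find_n_largest_circuits
  intro connections n _
  unfold Spec_find_n_largest_circuits
  have hA : find_n_largest_circuits connections n =
      PySem.List.slice (PySem.List.sorted
        ((pvNodesOf connections).foldl
          (fun pr node =>
            let f := pvFind pr.2 node
            (pr.1.insert f.1 (pr.1.getD f.1 0 + 1), f.2))
          ((PySem.Dict.empty : PySem.Dict Int Int), pvParentStar connections)).1.values
        (fun v => v) true) none (some n) := rfl
  have hB : find_n_largest_circuits_alt connections n =
      PySem.List.slice (PySem.List.sorted
        ((pvLabStar connections).values.foldl
          (fun c lx => c.insert lx (c.getD lx 0 + 1)) PySem.Dict.empty).values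
        (fun v => v) true) none (some n) := rfl
  rw [hA, hB]
  -- the invariant after processing all edges
  have hnd : (pvNodesOf connections).Nodup := pvNodes_nodup connections _ List.nodup_nil
  have hcs : ∀ c ∈ connections, c.1 ∈ pvNodesOf connections ∧ c.2 ∈ pvNodesOf connections :=
    fun c hc => pvNodes_mem connections _ c hc
  have hsplit : (pvNodesOf connections).foldl
      (fun pr node => (pr.1.insert node node, pr.2.insert node 1))
      ((PySem.Dict.empty : PySem.Dict Int Int), (PySem.Dict.empty : PySem.Dict Int Int))
      = ((pvNodesOf connections).foldl (fun d x => d.insert x x) PySem.Dict.empty,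
         (pvNodesOf connections).foldl (fun d x => d.insert x 1) PySem.Dict.empty) :=
    PySem.List.foldl_prod_mk (fun (d : PySem.Dict Int Int) (x : Int) => d.insert x x)
      (fun (d : PySem.Dict Int Int) (x : Int) => d.insert x 1)
      (pvNodesOf connections) _ _
  have hI0 := pvInit_inv (nodes := pvNodesOf connections) hnd
  have hstar : pvParentStar connections
      = (connections.foldl (fun st c => pvUnionA st c.1 c.2)
          ((pvNodesOf connections).foldl (fun d x => d.insert x x) PySem.Dict.empty,
           (pvNodesOf connections).foldl (fun d x => d.insert x 1) PySem.Dict.empty)).1 := by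
    rw [pvParentStar, hsplit]
  obtain ⟨hInv, hkeysB⟩ := pvFold_inv connections
    ((pvNodesOf connections).foldl (fun d x => d.insert x x) PySem.Dict.empty)
    ((pvNodesOf connections).foldl (fun d x => d.insert x 1) PySem.Dict.empty)
    PySem.Dict.empty hcs hI0
  rw [← hstar] at hInv
  obtain ⟨hF, hV, hKsub, hIdem, hE⟩ := hInv
  have hkeysLab : (pvLabStar connections).keys = pvNodesOf connections := by
    rw [pvLabStar, hkeysB, PySem.Dict.keys_empty]
    rfl
  -- A's counted dictionary is the counter of the root labels
  have hcountA : ((pvNodesOf connections).foldl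
      (fun pr node =>
        let f := pvFind pr.2 node
        (pr.1.insert f.1 (pr.1.getD f.1 0 + 1), f.2))
      ((PySem.Dict.empty : PySem.Dict Int Int), pvParentStar connections)).1
      = PySem.Dict.counter
          ((pvNodesOf connections).map (pvRootOf (pvParentStar connections))) := by
    rw [pvCount_fold hF (pvNodesOf connections) (pvParentStar connections)
      PySem.Dict.empty hF (fun y r => Iff.rfl) (fun x hx => hx)]
    rw [← PySem.Dict.foldl_insert_getD_add_one_eq_counter, List.foldl_map]
  -- B's counted dictionary is the counter of its stored labels
  have hcountB : ((pvLabStar connections).values.foldl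
      (fun c lx => c.insert lx (c.getD lx 0 + 1)) PySem.Dict.empty)
      = PySem.Dict.counter ((pvLabStar connections).values) :=
    PySem.Dict.foldl_insert_getD_add_one_eq_counter _
  -- B's stored labels, listed over the node list
  have hvalsB : (pvLabStar connections).values
      = (pvNodesOf connections).map (pvLabD (pvLabStar connections)) := by
    rw [PySem.Dict.values_eq_map_keys (pvLabStar connections)
      (by rw [hkeysLab]; exact hnd) 0, hkeysLab]
    apply List.map_congr_left
    intro k hk
    have hkk : k ∈ (pvLabStar connections).keys := by rw [hkeysLab]; exact hk
    exact PySem.Dict.getD_of_get?_eq_some _ 0 (pvGet?_of_mem_keys hkk)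
  -- the root of x equals the root of x's label
  have hrootlab : ∀ x ∈ pvNodesOf connections,
      pvRootOf (pvParentStar connections) x
        = pvRootOf (pvParentStar connections) (pvLabD (pvLabStar connections) x) := by
    intro x hx
    have hmem : pvLabD (pvLabStar connections) x ∈ pvNodesOf connections := (hIdem x hx).2
    have hEq : pvRootEq (pvParentStar connections) x (pvLabD (pvLabStar connections) x) :=
      (hE x hx _ hmem).2 (hIdem x hx).1.symm
    obtain ⟨r, h1, h2⟩ := hEq
    rw [pvRootOf_eq hF h1, pvRootOf_eq hF h2]
  have hcomp : (pvNodesOf connections).map (pvRootOf (pvParentStar connections))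
      = ((pvNodesOf connections).map (pvLabD (pvLabStar connections))).map
          (pvRootOf (pvParentStar connections)) := by
    rw [List.map_map]
    exact List.map_congr_left (fun x hx => hrootlab x hx)
  have hinj : ∀ u ∈ (pvNodesOf connections).map (pvLabD (pvLabStar connections)),
      ∀ v ∈ (pvNodesOf connections).map (pvLabD (pvLabStar connections)),
      pvRootOf (pvParentStar connections) u = pvRootOf (pvParentStar connections) v → u = v := by
    intro u hu v hv huv
    obtain ⟨x, hx, rfl⟩ := List.mem_map.1 hu
    obtain ⟨y, hy, rfl⟩ := List.mem_map.1 hv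
    rw [← hrootlab x hx, ← hrootlab y hy] at huv
    refine (hE x hx y hy).1 ⟨pvRootOf (pvParentStar connections) y, ?_, pvRootOf_spec hF y⟩
    rw [← huv]
    exact pvRootOf_spec hF x
  have hvals : ((pvNodesOf connections).foldl
      (fun pr node =>
        let f := pvFind pr.2 node
        (pr.1.insert f.1 (pr.1.getD f.1 0 + 1), f.2))
      ((PySem.Dict.empty : PySem.Dict Int Int), pvParentStar connections)).1.values
      = ((pvLabStar connections).values.foldl
          (fun c lx => c.insert lx (c.getD lx 0 + 1)) PySem.Dict.empty).values := by
    rw [hcountA, hcountB, hvalsB, hcomp]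
    exact pvCounterValues_map (pvRootOf (pvParentStar connections))
      ((pvNodesOf connections).map (pvLabD (pvLabStar connections))) hinj
  rw [hvals]
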